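-- pv_equiv track=rewrite | github.com/MathewYoussef/AI | GA_denoise_selector/generate_post_ga_winner_plots.py | group_indices_by_treatment_angle
-- ===== SOURCE A (Python) =====
-- from typing import Dict, Iterable, List, Sequence, Tuple
--
-- def group_indices_by_treatment_angle(file_names: Sequence[str]) -> Dict[Tuple[str, str], List[int]]:
--     groups: Dict[Tuple[str, str], List[int]] = {}
--     for idx, name in enumerate(file_names):
--         parts = name.split("/")
--         if len(parts) < 3:
--             continue
--         treatment = parts[0].replace("treatment_", "")
--         angle = parts[2]
--         groups.setdefault((treatment, angle), []).append(idx)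
--     return groups
-- ===== SOURCE B (Python) =====
-- def group_indices_by_treatment_angle(file_names):
--     keyed = []
--     for idx, name in enumerate(file_names):
--         parts = name.split("/")
--         if len(parts) >= 3:
--             keyed.append(((parts[0].replace("treatment_", ""), parts[2]), idx))
--     result = {}
--     for key, _ in keyed:
--         if key not in result:
--             result[key] = [i for k, i in keyed if k == key]
--     return result
-- ===== Notes on version B (the rewrite author's own statement) =====
-- stated objective: alternative
-- what changed: Instead of one scan that mutates per-key lists via setdefault/append, B first builds a flat (key, idx) index list, then for each first-seen key gathers its whole index list with one comprehension over the index; no in-place list mutation.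
import Mathlib
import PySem

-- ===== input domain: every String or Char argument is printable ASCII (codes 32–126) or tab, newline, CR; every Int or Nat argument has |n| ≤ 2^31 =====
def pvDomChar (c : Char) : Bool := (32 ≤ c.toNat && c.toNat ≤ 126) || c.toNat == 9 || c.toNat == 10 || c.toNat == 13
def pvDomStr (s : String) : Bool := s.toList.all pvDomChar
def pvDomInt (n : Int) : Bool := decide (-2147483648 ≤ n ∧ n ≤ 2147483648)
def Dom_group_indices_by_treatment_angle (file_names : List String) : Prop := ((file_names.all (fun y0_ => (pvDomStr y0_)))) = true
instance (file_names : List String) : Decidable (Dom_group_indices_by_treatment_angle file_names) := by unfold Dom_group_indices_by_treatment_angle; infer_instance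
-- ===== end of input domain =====

-- B replaces A's single setdefault/append-mutating scan by building a flat (key, index) list first,
-- then emitting, for each first-seen key, its full index list with one filter pass (alternative decomposition, not faster).


-- ===== PORT A =====
def group_indices_by_treatment_angle (file_names : List String) : List (String × String × List Int) :=
  let groups : PySem.Dict (String × String) (List Int) :=
    (PySem.List.enumerate file_names).foldl (fun groups p =>
      let parts := (PySem.Str.split? p.2 "/").getD []
      if parts.length < 3 then groups
      else
        let treatment := PySem.Str.replace (PySem.List.pyGetD parts 0 "") "treatment_" ""
        let angle := PySem.List.pyGetD parts 2 ""
        groups.modify (treatment, angle) [] (fun l => l ++ [p.1])) PySem.Dict.empty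
  groups.items.map (fun x => (x.1.1, x.1.2, x.2))

-- ===== PORT B =====
def group_indices_by_treatment_angle_alt (file_names : List String) : List (String × String × List Int) :=
  let keyed : List ((String × String) × Int) :=
    (PySem.List.enumerate file_names).foldl (fun acc p =>
      let parts := (PySem.Str.split? p.2 "/").getD []
      if 3 ≤ parts.length then
        acc ++ [((PySem.Str.replace (PySem.List.pyGetD parts 0 "") "treatment_" "",
                  PySem.List.pyGetD parts 2 ""), p.1)]
      else acc) []
  let result : PySem.Dict (String × String) (List Int) :=
    keyed.foldl (fun r q =>
      if r.contains q.1 then r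
      else r.insert q.1 ((keyed.filter (fun e => e.1 == q.1)).map (·.2))) PySem.Dict.empty
  result.items.map (fun x => (x.1.1, x.1.2, x.2))

-- ===== PRECONDITION & SPEC =====
def Spec_group_indices_by_treatment_angle (file_names : List String) (out : List (String × String × List Int)) : Prop := out = group_indices_by_treatment_angle_alt file_names
instance (file_names : List String) (out : List (String × String × List Int)) : Decidable (Spec_group_indices_by_treatment_angle file_names out) := by unfold Spec_group_indices_by_treatment_angle; infer_instance

-- ===== CLAIM (what is proved, stated in full; the proofs are below) =====
def Claim_equal_group_indices_by_treatment_angle : Prop := ∀ (file_names : List String), Dom_group_indices_by_treatment_angle file_names → Spec_group_indices_by_treatment_angle file_names (group_indices_by_treatment_angle file_names)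

-- ===== LEMMAS AND PROOFS =====

-- the filter condition and per-item (key, index) extraction shared by the proofs
def pvKeep (p : Int × String) : Bool := decide (3 ≤ ((PySem.Str.split? p.2 "/").getD []).length)
def pvItem (p : Int × String) : (String × String) × Int :=
  ((PySem.Str.replace (PySem.List.pyGetD ((PySem.Str.split? p.2 "/").getD []) 0 "") "treatment_" "",
    PySem.List.pyGetD ((PySem.Str.split? p.2 "/").getD []) 2 ""), p.1)
def pvKeyed (fns : List String) : List ((String × String) × Int) :=
  ((PySem.List.enumerate fns).filter pvKeep).map pvItem
def pvVals (l : List ((String × String) × Int)) (k : String × String) : List Int :=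
  (l.filter (fun e => e.1 == k)).map (·.2)

theorem pvDedup_concat {α : Type} [BEq α] [LawfulBEq α] (xs : List α) (x : α) :
    PySem.List.dedup (xs ++ [x]) =
      if x ∈ xs then PySem.List.dedup xs else PySem.List.dedup xs ++ [x] := by
  have h1 : PySem.List.dedup (xs ++ [x]) = (PySem.Set.ofList xs).add x := by
    simp [PySem.List.dedup, PySem.Set.ofList, List.foldl_append]
  by_cases h : x ∈ xs
  · rw [h1, PySem.Set.add_of_mem ((PySem.Set.mem_ofList xs x).2 h)]
    simp [PySem.List.dedup, h]
  · rw [h1, PySem.Set.add_of_not_mem (fun hm => h ((PySem.Set.mem_ofList xs x).1 hm))]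
    simp [PySem.List.dedup, h]

-- A's grouping fold, characterized: keys in first-occurrence order, value = all indices of that key
theorem pvFoldA_char (m : List ((String × String) × Int)) :
    (m.foldl (fun d q => d.modify q.1 [] (fun l => l ++ [q.2])) PySem.Dict.empty).keys
        = PySem.List.dedup (m.map (·.1)) ∧
    ∀ k, (m.foldl (fun d q => d.modify q.1 [] (fun l => l ++ [q.2])) PySem.Dict.empty).getD k []
        = pvVals m k := by
  induction m using List.reverseRecOn with
  | nil => constructor
           · simp [pysem, PySem.List.dedup, PySem.Set.ofList]
           · intro k; simp [pysem, pvVals]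
  | append_singleton m p ih =>
    obtain ⟨ihk, ihv⟩ := ih
    rw [List.foldl_append] at *
    simp only [List.foldl_cons, List.foldl_nil]
    set D := m.foldl (fun d q => d.modify q.1 [] (fun l => l ++ [q.2])) PySem.Dict.empty with hD
    have hmem : D.contains p.1 = true ↔ p.1 ∈ m.map (·.1) := by
      rw [PySem.Dict.contains_iff_mem_keys, ihk, PySem.List.mem_dedup]
    constructor
    · rw [PySem.Dict.keys_modify, List.map_append, List.map_cons, List.map_nil, pvDedup_concat]
      by_cases h : p.1 ∈ m.map (·.1)
      · rw [PySem.Dict.keys_insert_of_contains _ _ (hmem.2 h), ihk, if_pos h]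
      · rw [PySem.Dict.keys_insert_of_not_contains _ _ (by
          cases hc : D.contains p.1
          · rfl
          · exact absurd (hmem.1 hc) h), ihk, if_neg h]
    · intro k
      by_cases hk : k = p.1
      · subst hk
        rw [PySem.Dict.getD_modify_self, ihv]
        simp [pvVals, List.filter_append]
      · rw [PySem.Dict.getD_modify_of_ne _ _ _ hk, ihv]
        simp [pvVals, List.filter_append, Ne.symm hk]

-- B's building fold, characterized (values drawn from the fixed full list l)
theorem pvFoldB_char (l : List ((String × String) × Int)) (m : List ((String × String) × Int)) :
    (m.foldl (fun r q => if r.contains q.1 then r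
        else r.insert q.1 ((l.filter (fun e => e.1 == q.1)).map (·.2))) PySem.Dict.empty).keys
      = PySem.List.dedup (m.map (·.1)) ∧
    ∀ k ∈ (m.foldl (fun r q => if r.contains q.1 then r
        else r.insert q.1 ((l.filter (fun e => e.1 == q.1)).map (·.2))) PySem.Dict.empty).keys,
      (m.foldl (fun r q => if r.contains q.1 then r
        else r.insert q.1 ((l.filter (fun e => e.1 == q.1)).map (·.2))) PySem.Dict.empty).getD k []
      = pvVals l k := by
  induction m using List.reverseRecOn with
  | nil => constructor
           · simp [pysem, PySem.List.dedup, PySem.Set.ofList]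
           · intro k hk; simp [pysem] at hk
  | append_singleton m p ih =>
    obtain ⟨ihk, ihv⟩ := ih
    rw [List.foldl_append] at *
    simp only [List.foldl_cons, List.foldl_nil]
    set D := m.foldl (fun r q => if r.contains q.1 then r
        else r.insert q.1 ((l.filter (fun e => e.1 == q.1)).map (·.2))) PySem.Dict.empty with hD
    have hmem : D.contains p.1 = true ↔ p.1 ∈ m.map (·.1) := by
      rw [PySem.Dict.contains_iff_mem_keys, ihk, PySem.List.mem_dedup]
    rw [List.map_append, List.map_cons, List.map_nil, pvDedup_concat]
    by_cases h : p.1 ∈ m.map (·.1)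
    · rw [if_pos h, if_pos (hmem.2 h)]
      exact ⟨ihk, ihv⟩
    · have hc : D.contains p.1 = false := by
        cases hc : D.contains p.1
        · rfl
        · exact absurd (hmem.1 hc) h
      rw [if_neg h, if_neg (by simp [hc])]
      constructor
      · rw [PySem.Dict.keys_insert_of_not_contains _ _ hc, ihk]
      · intro k hk
        rw [PySem.Dict.keys_insert_of_not_contains _ _ hc] at hk
        by_cases hkp : k = p.1
        · subst hkp
          rw [PySem.Dict.getD_insert_self]
          rfl
        · rw [PySem.Dict.getD_insert_of_ne _ _ _ hkp]
          rcases List.mem_append.1 hk with hk' | hk'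
          · exact ihv k hk'
          · simp at hk'; exact absurd hk' hkp

-- the raw enumerate folds of the two ports, rewritten to folds over pvKeyed
theorem pvA_fold (fns : List String) :
    (PySem.List.enumerate fns).foldl (fun groups p =>
      let parts := (PySem.Str.split? p.2 "/").getD []
      if parts.length < 3 then groups
      else
        let treatment := PySem.Str.replace (PySem.List.pyGetD parts 0 "") "treatment_" ""
        let angle := PySem.List.pyGetD parts 2 ""
        groups.modify (treatment, angle) [] (fun l => l ++ [p.1])) PySem.Dict.empty
    = (pvKeyed fns).foldl (fun d q => d.modify q.1 [] (fun l => l ++ [q.2])) PySem.Dict.empty := by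
  have hf : (fun (groups : PySem.Dict (String × String) (List Int)) (p : Int × String) =>
      let parts := (PySem.Str.split? p.2 "/").getD []
      if parts.length < 3 then groups
      else
        let treatment := PySem.Str.replace (PySem.List.pyGetD parts 0 "") "treatment_" ""
        let angle := PySem.List.pyGetD parts 2 ""
        groups.modify (treatment, angle) [] (fun l => l ++ [p.1]))
      = (fun groups p => if pvKeep p then
            groups.modify (pvItem p).1 [] (fun l => l ++ [(pvItem p).2]) else groups) := by
    funext d p
    by_cases h : 3 ≤ ((PySem.Str.split? p.2 "/").getD []).length
    · simp [pvKeep, pvItem, h, Nat.not_lt.2 h]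
    · simp [pvKeep, h, Nat.lt_of_not_le h]
  rw [hf, pvKeyed, List.foldl_map, List.foldl_filter]

theorem pvB_keyed (fns : List String) :
    (PySem.List.enumerate fns).foldl (fun acc p =>
      let parts := (PySem.Str.split? p.2 "/").getD []
      if 3 ≤ parts.length then
        acc ++ [((PySem.Str.replace (PySem.List.pyGetD parts 0 "") "treatment_" "",
                  PySem.List.pyGetD parts 2 ""), p.1)]
      else acc) []
    = pvKeyed fns := by
  have hf : (fun (acc : List ((String × String) × Int)) (p : Int × String) =>
      let parts := (PySem.Str.split? p.2 "/").getD []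
      if 3 ≤ parts.length then
        acc ++ [((PySem.Str.replace (PySem.List.pyGetD parts 0 "") "treatment_" "",
                  PySem.List.pyGetD parts 2 ""), p.1)]
      else acc)
      = (fun acc p => if pvKeep p then acc ++ [pvItem p] else acc) := by
    funext acc p
    by_cases hp : 3 ≤ ((PySem.Str.split? p.2 "/").getD []).length
    · simp [pvKeep, pvItem, hp]
    · simp [pvKeep, hp]
  have h := PySem.List.foldl_append_if pvKeep pvItem (PySem.List.enumerate fns) []
  rw [List.nil_append] at h
  rw [hf, pvKeyed, ← h]

-- ===== VERDICT (by name: the statement is the Claim_ definition above) =====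
theorem group_indices_by_treatment_angle_spec : Claim_equal_group_indices_by_treatment_angle := by
  intro fns _
  unfold Spec_group_indices_by_treatment_angle
  unfold group_indices_by_treatment_angle group_indices_by_treatment_angle_alt
  dsimp only
  rw [pvA_fold, pvB_keyed]
  obtain ⟨hAk, hAv⟩ := pvFoldA_char (pvKeyed fns)
  obtain ⟨hBk, hBv⟩ := pvFoldB_char (pvKeyed fns) (pvKeyed fns)
  have hnodup : (PySem.List.dedup ((pvKeyed fns).map (·.1))).Nodup := by
    rw [PySem.List.dedup]; exact PySem.Set.nodup_ofList _
  have hAitems := PySem.Dict.items_eq_map_keys _ (hAk ▸ hnodup) ([] : List Int)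
  have hBitems := PySem.Dict.items_eq_map_keys _ (hBk ▸ hnodup) ([] : List Int)
  congr 1
  rw [hAitems, hBitems, hAk, hBk]
  apply List.map_congr_left
  intro k hk
  rw [hAv k, hBv k (by rw [hBk]; exact hk)]
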